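-- pv_equiv track=rewrite | github.com/vadanrod14/RA.Aid | ra_aid/text/code_cleaning.py | fix_triple_quote_contents
-- ===== SOURCE A (Python) =====
-- def fix_triple_quote_contents(text: str) -> str:
--     """
--     Fixes potentially incorrect escaping of nested triple quotes within Python code.
--
--     Assumes that outermost triple quotes start on the first line and end on the last line
--     of a string literal. Escapes any unescaped inner triple quotes of matching style.
--
--     Args:
--         text: A string containing Python code, potentially with unescaped
--               nested triple quotes.
--
--     Returns:
--         A string with the nested triple quotes properly escaped.
--     """
--     if not text:
--         return text
--
--     lines = text.splitlines()
--     result = []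
--
--     # Find the quote style from the first line
--     first_line = lines[0]
--     last_line = lines[-1]
--
--     # Determine which quote style is used (single or double)
--     quote_style = None
--     if '"""' in first_line:
--         quote_style = '"""'
--     elif "'''" in first_line:
--         quote_style = "'''"
--
--     # If we can't find a quote style, or if we only have one line, return original
--     if not quote_style or len(lines) <= 1:
--         return text
--
--     # Check if the same quote style appears in the last line
--     if quote_style not in last_line:
--         return text
--
--     # Keep first line as is
--     result.append(first_line)
--
--     # Process all middle lines - escape any matching triple quotes
--     for i in range(1, len(lines)-1):
--         line = lines[i]
--
--         # Find all unescaped instances of the quote style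
--         index = 0
--         while index < len(line):
--             found_index = line.find(quote_style, index)
--             if found_index == -1:
--                 break
--
--             # Check if it's already escaped
--             if found_index > 0 and line[found_index-1] == '\\':
--                 # Count backslashes to handle cases like \\\"\"\"
--                 backslash_count = 0
--                 check_index = found_index - 1
--                 while check_index >= 0 and line[check_index] == '\\':
--                     backslash_count += 1
--                     check_index -= 1
--
--                 # If odd number of backslashes, it's already escaped
--                 if backslash_count % 2 == 1:
--                     index = found_index + 3
--                     continue
--
--             # Found an unescaped triple quote - escape it
--             line = line[:found_index] + '\\' + line[found_index:]
--             index = found_index + 4  # Skip past the newly escaped triple quote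
--
--         result.append(line)
--
--     # Keep last line as is
--     result.append(last_line)
--
--     return '\n'.join(result)
-- ===== SOURCE B (Python) =====
-- def fix_triple_quote_contents(text: str) -> str:
--     """Escape unescaped nested triple quotes in middle lines (one-pass state machine per line)."""
--     if not text:
--         return text
--
--     lines = text.splitlines()
--     first_line = lines[0]
--     last_line = lines[-1]
--
--     if '"""' in first_line:
--         quote_style = '"""'
--     elif "'''" in first_line:
--         quote_style = "'''"
--     else:
--         quote_style = None
--
--     if not quote_style or len(lines) <= 1 or quote_style not in last_line:
--         return text
--
--     middle = [_escape_triples(line, quote_style) for line in lines[1:-1]]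
--     return '\n'.join([first_line] + middle + [last_line])
--
--
-- def _escape_triples(line: str, q: str) -> str:
--     """Single left-to-right pass: maximal backslash run, then check for the triple quote."""
--     out = []
--     i = 0
--     n = len(line)
--     while i < n:
--         j = i
--         while j < n and line[j] == '\\':
--             j += 1
--         out.append(line[i:j])
--         if line[j:j+3] == q:
--             if (j - i) % 2 == 0:
--                 out.append('\\')
--             out.append(q)
--             i = j + 3
--         elif j < n:
--             out.append(line[j])
--             i = j + 1
--         else:
--             i = j
--     return ''.join(out)
-- ===== Notes on version B (the rewrite author's own statement) =====
-- stated objective: alternative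
-- what changed: Each middle line is rewritten in a single left-to-right pass (take the maximal backslash run, then test for the triple quote and decide escaping from the run's parity) instead of A's repeated find-from-index, backward backslash-counting and in-place string-splice loop.
import Mathlib
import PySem

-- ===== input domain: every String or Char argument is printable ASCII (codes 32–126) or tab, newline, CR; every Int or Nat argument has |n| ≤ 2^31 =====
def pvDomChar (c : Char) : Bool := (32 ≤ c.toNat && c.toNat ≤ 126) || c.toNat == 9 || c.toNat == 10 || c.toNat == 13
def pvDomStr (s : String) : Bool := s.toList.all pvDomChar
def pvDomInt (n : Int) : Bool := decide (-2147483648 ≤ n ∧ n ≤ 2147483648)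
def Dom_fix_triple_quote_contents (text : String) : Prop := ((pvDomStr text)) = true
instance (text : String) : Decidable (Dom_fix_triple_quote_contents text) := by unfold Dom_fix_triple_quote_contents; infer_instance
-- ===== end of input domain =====

-- B replaces A's repeated find + backslash-counting + string-splice loop by a single left-to-right
-- pass per middle line (maximal backslash run, then triple-quote check); alternative, same result.

-- ===== PORT A =====

-- backward backslash counter: A's `while check_index >= 0 and cs[check_index] == '\\'`
def pvA_countBack (cs : List Char) : Nat → Nat
  | 0 => if cs[0]? = some '\\' then 1 else 0
  | k+1 => if cs[(k+1 : Nat)]? = some '\\' then pvA_countBack cs k + 1 else 0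

-- A's inner `while index < len(line)` loop over one middle line
def pvA_loop (q : Char) (cs : List Char) (index : Nat) : List Char :=
  if hidx : index < cs.length then
    if hf : PySem.Chars.findFrom cs [q, q, q] (index : Int) none = -1 then cs
    else
      let fn := (PySem.Chars.findFrom cs [q, q, q] (index : Int) none).toNat
      if fn > 0 ∧ cs[fn - 1]? = some '\\' ∧ pvA_countBack cs (fn - 1) % 2 = 1 then
        pvA_loop q cs (fn + 3)
      else
        pvA_loop q (cs.take fn ++ '\\' :: cs.drop fn) (fn + 4)
  else cs
termination_by cs.length - index
decreasing_by
  · have hspec := PySem.Chars.findFrom_natCast_spec cs [q, q, q] index (le_of_lt hidx) hf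
    have h3 := hspec.2.1.length_le
    simp at h3
    omega
  · have hspec := PySem.Chars.findFrom_natCast_spec cs [q, q, q] index (le_of_lt hidx) hf
    have h3 := hspec.2.1.length_le
    have h1 := hspec.1
    simp at h3 ⊢
    omega

def fix_triple_quote_contents (text : String) : String :=
  if text = "" then text
  else
    let lines := PySem.Chars.splitlines text.toList
    let first_line := PySem.List.pyGetD lines 0 []
    let last_line := PySem.List.pyGetD lines (-1) []
    let quote_style : Option Char :=
      if PySem.Chars.isIn ['"', '"', '"'] first_line then some '"'
      else if PySem.Chars.isIn ['\'', '\'', '\''] first_line then some '\''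
      else none
    match quote_style with
    | none => text
    | some q =>
      if lines.length ≤ 1 then text
      else if ¬ PySem.Chars.isIn [q, q, q] last_line then text
      else
        let result := (PySem.List.pyRange 1 ((lines.length : Int) - 1) 1).foldl
          (fun acc i => acc ++ [pvA_loop q (PySem.List.pyGetD lines i []) 0]) [first_line]
        String.ofList (PySem.Chars.join ['\n'] (result ++ [last_line]))

-- ===== PORT B =====

-- `while j < n and cs[j] == '\\'` : end of the maximal backslash run starting at j
def pvB_runEnd (cs : List Char) (j : Nat) : Nat :=
  if h : j < cs.length ∧ cs[j]? = some '\\' then pvB_runEnd cs (j + 1) else j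
termination_by cs.length - j

theorem pvB_runEnd_ge (cs : List Char) (j : Nat) : j ≤ pvB_runEnd cs j := by
  unfold pvB_runEnd
  split
  · exact le_trans (Nat.le_succ j) (pvB_runEnd_ge cs (j+1))
  · exact le_refl j
termination_by cs.length - j
decreasing_by omega

-- B's one-pass escape of a single middle line (j = pvB_runEnd cs i, run = cs[i:j])
def pvB_loop (q : Char) (cs : List Char) (i : Nat) : List Char :=
  if hi : i < cs.length then
    if PySem.List.slice cs (some (pvB_runEnd cs i : Int)) (some ((pvB_runEnd cs i : Int) + 3)) =
        [q, q, q] then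
      (cs.take (pvB_runEnd cs i)).drop i ++
        (if (pvB_runEnd cs i - i) % 2 = 0 then ['\\'] else []) ++ [q, q, q] ++
        pvB_loop q cs (pvB_runEnd cs i + 3)
    else if pvB_runEnd cs i < cs.length then
      (cs.take (pvB_runEnd cs i)).drop i ++ [cs.getD (pvB_runEnd cs i) ' '] ++
        pvB_loop q cs (pvB_runEnd cs i + 1)
    else (cs.take (pvB_runEnd cs i)).drop i
  else []
termination_by cs.length - i
decreasing_by
  · have := pvB_runEnd_ge cs i
    omega
  · have := pvB_runEnd_ge cs i
    omega

def fix_triple_quote_contents_alt (text : String) : String :=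
  if text = "" then text
  else
    let lines := PySem.Chars.splitlines text.toList
    let first_line := PySem.List.pyGetD lines 0 []
    let last_line := PySem.List.pyGetD lines (-1) []
    let quote_style : Option Char :=
      if PySem.Chars.isIn ['"', '"', '"'] first_line then some '"'
      else if PySem.Chars.isIn ['\'', '\'', '\''] first_line then some '\''
      else none
    match quote_style with
    | none => text
    | some q =>
      if lines.length ≤ 1 then text
      else if ¬ PySem.Chars.isIn [q, q, q] last_line then text
      else
        let middle := (PySem.List.slice lines (some 1) (some ((lines.length : Int) - 1))).map
          (fun l => pvB_loop q l 0)
        String.ofList (PySem.Chars.join ['\n'] ([first_line] ++ middle ++ [last_line]))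

-- ===== PRECONDITION & SPEC =====
def Spec_fix_triple_quote_contents (text : String) (out : String) : Prop := out = fix_triple_quote_contents_alt text
instance (text : String) (out : String) : Decidable (Spec_fix_triple_quote_contents text out) := by unfold Spec_fix_triple_quote_contents; infer_instance

-- ===== CLAIM (what is proved, stated in full; the proofs are below) =====
def Claim_equal_fix_triple_quote_contents : Prop := ∀ (text : String), Dom_fix_triple_quote_contents text → Spec_fix_triple_quote_contents text (fix_triple_quote_contents text)

-- ===== LEMMAS AND PROOFS =====

-- length of the leading backslash run
def pvBlen : List Char → Nat
  | [] => 0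
  | c :: t => if c = '\\' then pvBlen t + 1 else 0

-- length of the maximal backslash run ending just before position p
def pvRun (cs : List Char) : Nat → Nat
  | 0 => 0
  | p + 1 => if cs[p]? = some '\\' then pvRun cs p + 1 else 0

-- reference scan both loops are reduced to
def pvScan (q : Char) (s : List Char) : List Char :=
  if h3 : (s.drop (pvBlen s)).take 3 = [q, q, q] then
    s.take (pvBlen s) ++ (if pvBlen s % 2 = 1 then [] else ['\\']) ++ [q, q, q] ++
      pvScan q (s.drop (pvBlen s + 3))
  else if h : pvBlen s < s.length then
    s.take (pvBlen s) ++ [s.getD (pvBlen s) ' '] ++ pvScan q (s.drop (pvBlen s + 1))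
  else s
termination_by s.length
decreasing_by
  · have := congrArg List.length h3
    simp at this ⊢
    omega
  · simp
    omega

theorem pv_countBack_eq_run (cs : List Char) (k : Nat) :
    pvA_countBack cs k = pvRun cs (k + 1) := by
  induction k with
  | zero => simp [pvA_countBack, pvRun]
  | succ k ih =>
    have h1 : pvRun cs (k + 1 + 1) = if cs[k + 1]? = some '\\' then pvRun cs (k + 1) + 1 else 0 := rfl
    have h2 : pvA_countBack cs (k + 1) = if cs[k + 1]? = some '\\' then pvA_countBack cs k + 1 else 0 := rfl
    rw [h1, h2, ih]

theorem pv_run_shift (cs : List Char) (i : Nat)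
    (hb : i = 0 ∨ cs[i - 1]? ≠ some '\\') (m : Nat) :
    pvRun (cs.drop i) m = pvRun cs (i + m) := by
  induction m with
  | zero =>
    rcases hb with h0 | hb
    · subst h0; rfl
    · cases i with
      | zero => rfl
      | succ j =>
        have h1 : pvRun cs (j + 1) = if cs[j]? = some '\\' then pvRun cs j + 1 else 0 := rfl
        simp only [Nat.add_sub_cancel] at hb
        simp only [Nat.add_zero, h1]
        simp [hb]
        rfl
  | succ m ih =>
    have h1 : pvRun (List.drop i cs) (m + 1) =
        if (List.drop i cs)[m]? = some '\\' then pvRun (List.drop i cs) m + 1 else 0 := rfl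
    have h2 : pvRun cs (i + (m + 1)) =
        if cs[i + m]? = some '\\' then pvRun cs (i + m) + 1 else 0 := rfl
    rw [h1, h2, List.getElem?_drop, ih]

theorem pv_blen_le (s : List Char) : pvBlen s ≤ s.length := by
  induction s with
  | nil => simp [pvBlen]
  | cons c t ih => by_cases hc : c = '\\' <;> simp [pvBlen, hc] <;> omega

theorem pv_blen_get (s : List Char) (j : Nat) (hj : j < pvBlen s) : s[j]? = some '\\' := by
  induction s generalizing j with
  | nil => simp [pvBlen] at hj
  | cons c t ih =>
    by_cases hc : c = '\\'
    · cases j with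
      | zero => simp [hc]
      | succ j =>
        simp only [List.getElem?_cons_succ]
        exact ih j (by simp [pvBlen, hc] at hj; omega)
    · simp [pvBlen, hc] at hj

theorem pv_blen_stop (s : List Char) (h : pvBlen s < s.length) : s[pvBlen s]? ≠ some '\\' := by
  induction s with
  | nil => simp at h
  | cons c t ih =>
    by_cases hc : c = '\\'
    · have h' : pvBlen t < t.length := by simp [pvBlen, hc] at h; omega
      simpa [pvBlen, hc] using ih h'
    · simp [pvBlen, hc]

theorem pv_run_of_le_blen (s : List Char) (m : Nat) (hm : m ≤ pvBlen s) : pvRun s m = m := by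
  induction m with
  | zero => rfl
  | succ m ih =>
    have hget := pv_blen_get s m (by omega)
    have h1 : pvRun s (m + 1) = if s[m]? = some '\\' then pvRun s m + 1 else 0 := rfl
    rw [h1, if_pos hget, ih (by omega)]

theorem pv_scan_nil (q : Char) : pvScan q [] = [] := by
  rw [pvScan]
  simp [pvBlen]

theorem pv_getq (q : Char) (s : List Char) (p : Nat) (hocc : [q, q, q] <+: s.drop p) :
    s[p]? = some q := by
  obtain ⟨t, ht⟩ := hocc
  have h0 : (s.drop p)[0]? = some q := by rw [← ht]; rfl
  simpa [List.getElem?_drop] using h0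

theorem pv_scan_no_occ (q : Char) (s : List Char)
    (h : ¬ [q, q, q] <:+: s) : pvScan q s = s := by
  unfold pvScan
  split
  · next h3 =>
    exact absurd (((h3 ▸ List.take_prefix 3 (s.drop (pvBlen s))).isInfix).trans
      (List.drop_suffix (pvBlen s) s).isInfix) h
  · split
    · next h3 hR =>
      have hno : ¬ [q, q, q] <:+: s.drop (pvBlen s + 1) := fun hc =>
        h (hc.trans (List.drop_suffix _ _).isInfix)
      rw [pv_scan_no_occ q _ hno]
      have hgd : s.getD (pvBlen s) ' ' = s[pvBlen s] := List.getD_eq_getElem s ' ' hR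
      conv_rhs => rw [← List.take_append_drop (pvBlen s + 1) s]
      rw [List.take_add_one, List.getElem?_eq_getElem hR, hgd]
      simp
    · rfl
termination_by s.length
decreasing_by
  simp
  omega

theorem pv_scan_first_occ (q : Char) (hq : q ≠ '\\') (s : List Char) (p : Nat)
    (hocc : [q, q, q] <+: s.drop p) (hmin : ∀ j < p, ¬ [q, q, q] <+: s.drop j) :
    pvScan q s = s.take p ++ (if pvRun s p % 2 = 1 then [] else ['\\']) ++ [q, q, q] ++
      pvScan q (s.drop (p + 3)) := by
  have hnotlt : ¬ p < pvBlen s := by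
    intro hlt
    have h1 := pv_getq q s p hocc
    rw [pv_blen_get s p hlt] at h1
    exact hq (Option.some.inj h1).symm
  conv_lhs => unfold pvScan
  split
  · next h3 =>
    have hR3 : [q, q, q] <+: s.drop (pvBlen s) := h3 ▸ List.take_prefix 3 _
    have hpe : p = pvBlen s := by
      have h2 : ¬ pvBlen s < p := fun hlt => hmin _ hlt hR3
      omega
    rw [hpe, pv_run_of_le_blen s (pvBlen s) (le_refl _)]
  · next h3 =>
    split
    · next hR =>
      have hpge : pvBlen s + 1 ≤ p := by
        have h2 : p ≠ pvBlen s := by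
          intro he
          have hx := (List.prefix_iff_eq_take).mp (he ▸ hocc)
          simp at hx
          exact h3 hx.symm
        omega
      have hocc' : [q, q, q] <+: (s.drop (pvBlen s + 1)).drop (p - (pvBlen s + 1)) := by
        rw [List.drop_drop, show pvBlen s + 1 + (p - (pvBlen s + 1)) = p from by omega]
        exact hocc
      have hmin' : ∀ j < p - (pvBlen s + 1),
          ¬ [q, q, q] <+: (s.drop (pvBlen s + 1)).drop j := by
        intro j hj hc
        rw [List.drop_drop] at hc
        exact hmin _ (by omega) hc
      rw [pv_scan_first_occ q hq _ _ hocc' hmin']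
      have hb : (pvBlen s + 1) = 0 ∨ s[(pvBlen s + 1) - 1]? ≠ some '\\' := by
        right; simpa using pv_blen_stop s hR
      have hshift : pvRun (s.drop (pvBlen s + 1)) (p - (pvBlen s + 1)) = pvRun s p := by
        rw [pv_run_shift s (pvBlen s + 1) hb, Nat.add_sub_cancel' hpge]
      have htake : s.take (pvBlen s) ++ [s.getD (pvBlen s) ' '] ++
          (s.drop (pvBlen s + 1)).take (p - (pvBlen s + 1)) = s.take p := by
        have hgd : s.getD (pvBlen s) ' ' = s[pvBlen s] := List.getD_eq_getElem s ' ' hR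
        have h4 : s.take (pvBlen s + 1) = s.take (pvBlen s) ++ [s[pvBlen s]] := by
          rw [List.take_add_one, List.getElem?_eq_getElem hR]; rfl
        have h5 : s.take ((pvBlen s + 1) + (p - (pvBlen s + 1))) =
            s.take (pvBlen s + 1) ++ (s.drop (pvBlen s + 1)).take (p - (pvBlen s + 1)) :=
          List.take_add ..
        rw [Nat.add_sub_cancel' hpge] at h5
        rw [hgd, h5, h4, List.append_assoc]
      have hdrop : (s.drop (pvBlen s + 1)).drop (p - (pvBlen s + 1) + 3) = s.drop (p + 3) := by
        rw [List.drop_drop]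
        congr 1
        omega
      rw [hshift, hdrop, ← htake]
      simp [List.append_assoc]
    · next hR =>
      exfalso
      have hlen := hocc.length_le
      simp at hlen
      exact hnotlt (by omega)
termination_by s.length
decreasing_by
  simp
  omega

theorem pv_runEnd_eq (cs : List Char) (i : Nat) :
    pvB_runEnd cs i = i + pvBlen (cs.drop i) := by
  rw [pvB_runEnd]
  split
  · next h =>
    rw [pv_runEnd_eq cs (i + 1)]
    have hc : cs[i] = '\\' := by
      have h2 := h.2
      rw [List.getElem?_eq_getElem h.1] at h2
      exact Option.some.inj h2
    rw [List.drop_eq_getElem_cons h.1]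
    simp [pvBlen, hc]
    omega
  · next h =>
    by_cases hi : i < cs.length
    · have hne : ¬ cs[i]? = some '\\' := fun hh => h ⟨hi, hh⟩
      have hc : cs[i] ≠ '\\' := fun hh => hne (by rw [List.getElem?_eq_getElem hi, hh])
      rw [List.drop_eq_getElem_cons hi]
      simp [pvBlen, hc]
    · have hd : cs.drop i = [] := List.drop_eq_nil_of_le (by omega)
      rw [hd]
      simp [pvBlen]
termination_by cs.length - i
decreasing_by omega

theorem pvB_eq_scan (q : Char) (cs : List Char) (i : Nat) :
    pvB_loop q cs i = pvScan q (cs.drop i) := by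
  conv_lhs => unfold pvB_loop
  by_cases hi : i < cs.length
  · rw [dif_pos hi]
    have hre : pvB_runEnd cs i = i + pvBlen (cs.drop i) := pv_runEnd_eq cs i
    have hRle : pvBlen (cs.drop i) ≤ (cs.drop i).length := pv_blen_le _
    have hslice : PySem.List.slice cs (some (pvB_runEnd cs i : Int))
        (some ((pvB_runEnd cs i : Int) + 3)) =
        ((cs.drop i).drop (pvBlen (cs.drop i))).take 3 := by
      have h := PySem.List.slice_natCast_add cs (pvB_runEnd cs i) 3
      push_cast at h
      rw [h, hre, List.drop_drop]
    have hrun : (cs.take (pvB_runEnd cs i)).drop i = (cs.drop i).take (pvBlen (cs.drop i)) := by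
      rw [hre, List.drop_take]
      congr 1
      omega
    have hlt : (pvB_runEnd cs i < cs.length) ↔ (pvBlen (cs.drop i) < (cs.drop i).length) := by
      rw [hre]
      simp
      omega
    conv_rhs => unfold pvScan
    rw [hslice, hrun]
    by_cases h3 : ((cs.drop i).drop (pvBlen (cs.drop i))).take 3 = [q, q, q]
    · rw [if_pos h3, dif_pos h3]
      rw [pvB_eq_scan q cs (pvB_runEnd cs i + 3)]
      have hd : cs.drop (pvB_runEnd cs i + 3) = (cs.drop i).drop (pvBlen (cs.drop i) + 3) := by
        rw [List.drop_drop, hre]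
        congr 1
      rw [hd, hre]
      have hpar : (i + pvBlen (cs.drop i) - i) % 2 = pvBlen (cs.drop i) % 2 := by omega
      rw [hpar]
      by_cases hp : pvBlen (List.drop i cs) % 2 = 0
      · simp [hp]
      · simp [show pvBlen (List.drop i cs) % 2 = 1 from by omega]
    · rw [if_neg h3, dif_neg h3]
      by_cases hR : pvBlen (cs.drop i) < (cs.drop i).length
      · rw [if_pos (hlt.mpr hR), dif_pos hR]
        rw [pvB_eq_scan q cs (pvB_runEnd cs i + 1)]
        have hd : cs.drop (pvB_runEnd cs i + 1) = (cs.drop i).drop (pvBlen (cs.drop i) + 1) := by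
          rw [List.drop_drop, hre]
          congr 1
        have hgd : cs.getD (pvB_runEnd cs i) ' ' = (cs.drop i).getD (pvBlen (cs.drop i)) ' ' := by
          rw [hre]
          simp [List.getD_eq_getElem?_getD, List.getElem?_drop]
        rw [hd, hgd]
      · rw [if_neg (by rw [hlt]; exact hR), dif_neg hR]
        have : (cs.drop i).length ≤ pvBlen (cs.drop i) := by omega
        rw [List.take_of_length_le this]
  · rw [dif_neg hi]
    have hd : cs.drop i = [] := List.drop_eq_nil_of_le (by omega)
    rw [hd, pv_scan_nil]
termination_by cs.length - i
decreasing_by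
  all_goals (have := pvB_runEnd_ge cs i; omega)

theorem pvA_eq_scan (q : Char) (hq : q ≠ '\\') : ∀ (n : Nat) (cs : List Char) (i : Nat),
    cs.length - i ≤ n → i ≤ cs.length → (i = 0 ∨ cs[i - 1]? ≠ some '\\') →
    pvA_loop q cs i = cs.take i ++ pvScan q (cs.drop i) := by
  intro n
  induction n with
  | zero =>
    intro cs i h hle hb
    have hieq : i = cs.length := by omega
    rw [pvA_loop]
    rw [dif_neg (by omega)]
    rw [List.drop_eq_nil_of_le (by omega), pv_scan_nil, List.take_of_length_le (by omega)]
    simp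
  | succ n ih =>
    intro cs i h hle hb
    rw [pvA_loop]
    by_cases hi : i < cs.length
    · rw [dif_pos hi]
      by_cases hf : PySem.Chars.findFrom cs [q, q, q] (i : Int) none = -1
      · rw [dif_pos hf]
        have hno : ¬ [q, q, q] <:+: cs.drop i :=
          (PySem.Chars.findFrom_natCast_eq_neg_one_iff cs [q, q, q] i (le_of_lt hi)).mp hf
        rw [pv_scan_no_occ q _ hno, List.take_append_drop]
      · rw [dif_neg hf]
        have hspec := PySem.Chars.findFrom_natCast_spec cs [q, q, q] i (le_of_lt hi) hf
        set fn := (PySem.Chars.findFrom cs [q, q, q] (i : Int) none).toNat with hfn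
        have hge : i ≤ fn := by
          have h1 := hspec.1
          omega
        have hocc : [q, q, q] <+: cs.drop fn := hspec.2.1
        have hmin := hspec.2.2
        have hlen3 : fn + 3 ≤ cs.length := by
          have h1 := hocc.length_le
          simp at h1
          omega
        obtain ⟨t, ht⟩ := hocc
        have hocc : [q, q, q] <+: cs.drop fn := ⟨t, ht⟩
        have hocc' : [q, q, q] <+: (cs.drop i).drop (fn - i) := by
          rw [List.drop_drop, show i + (fn - i) = fn from by omega]
          exact hocc
        have hmin' : ∀ j < fn - i, ¬ [q, q, q] <+: (cs.drop i).drop j := by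
          intro j hj hc
          rw [List.drop_drop] at hc
          exact hmin _ (by omega) (by omega) hc
        have hscan := pv_scan_first_occ q hq (cs.drop i) (fn - i) hocc' hmin'
        have hrun : pvRun (cs.drop i) (fn - i) = pvRun cs fn := by
          rw [pv_run_shift cs i hb, show i + (fn - i) = fn from by omega]
        have hdrop3 : (cs.drop i).drop (fn - i + 3) = cs.drop (fn + 3) := by
          rw [List.drop_drop]
          congr 1
          omega
        have htakef : cs.take i ++ (cs.drop i).take (fn - i) = cs.take fn := by
          have h5 : List.take (i + (fn - i)) cs =
              List.take i cs ++ List.take (fn - i) (List.drop i cs) := List.take_add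
          rw [show i + (fn - i) = fn from by omega] at h5
          exact h5.symm
        have htake3 : cs.take fn ++ [q, q, q] = cs.take (fn + 3) := by
          have h5 : List.take (fn + 3) cs =
              List.take fn cs ++ List.take 3 (List.drop fn cs) := List.take_add
          rw [h5, ← ht]
          rfl
        have hsc : (fn > 0 ∧ cs[fn - 1]? = some '\\' ∧ pvA_countBack cs (fn - 1) % 2 = 1) ↔
            pvRun cs fn % 2 = 1 := by
          constructor
          · rintro ⟨h1, h2, h3⟩
            rw [pv_countBack_eq_run, show fn - 1 + 1 = fn from by omega] at h3
            exact h3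
          · intro hodd
            match hfn2 : fn, hodd with
            | m + 1, hodd =>
              have hr : pvRun cs (m + 1) = if cs[m]? = some '\\' then pvRun cs m + 1 else 0 := rfl
              by_cases hm : cs[m]? = some '\\'
              · refine ⟨by omega, by simpa using hm, ?_⟩
                rw [pv_countBack_eq_run]
                simpa using hodd
              · rw [hr, if_neg hm] at hodd
                omega
        by_cases hskip : fn > 0 ∧ cs[fn - 1]? = some '\\' ∧ pvA_countBack cs (fn - 1) % 2 = 1
        · rw [if_pos hskip]
          have hodd : pvRun (cs.drop i) (fn - i) % 2 = 1 := by
            rw [hrun]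
            exact hsc.mp hskip
          have hb' : fn + 3 = 0 ∨ cs[fn + 3 - 1]? = some '\\' → False := by
            intro hx
            rcases hx with hx | hx
            · omega
            · have hq2 : cs[fn + 2]? = some q := by
                have : (cs.drop fn)[2]? = some q := by rw [← ht]; rfl
                rwa [List.getElem?_drop] at this
              rw [show fn + 3 - 1 = fn + 2 from by omega, hq2] at hx
              exact hq (Option.some.inj hx)
          rw [ih cs (fn + 3) (by omega) (by omega)
            (Or.inr (fun hx => hb' (Or.inr hx)))]
          rw [hscan, if_pos hodd, hdrop3]
          calc cs.take (fn + 3) ++ pvScan q (cs.drop (fn + 3)) =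
              (cs.take fn ++ [q, q, q]) ++ pvScan q (cs.drop (fn + 3)) := by rw [htake3]
            _ = cs.take i ++ ((cs.drop i).take (fn - i) ++ [] ++ [q, q, q] ++
                pvScan q (cs.drop (fn + 3))) := by
              rw [← htakef]
              simp [List.append_assoc]
        · rw [if_neg hskip]
          have heven : ¬ pvRun (cs.drop i) (fn - i) % 2 = 1 := by
            rw [hrun]
            exact fun hh => hskip (hsc.mpr hh)
          have hcs' : cs.take fn ++ '\\' :: cs.drop fn = cs.take fn ++ '\\' :: q :: q :: q :: t := by
            rw [← ht]
            rfl
          have hlentake : (cs.take fn).length = fn := List.length_take_of_le (by omega)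
          have hlen' : (cs.take fn ++ '\\' :: cs.drop fn).length = cs.length + 1 := by
            rw [List.length_append, hlentake, List.length_cons, List.length_drop]
            omega
          have hbound : (cs.take fn ++ '\\' :: q :: q :: q :: t)[fn + 4 - 1]? = some q := by
            rw [List.getElem?_append_right (by omega)]
            rw [hlentake, show fn + 4 - 1 - fn = 3 from by omega]
            rfl
          rw [ih (cs.take fn ++ '\\' :: cs.drop fn) (fn + 4) (by rw [hlen']; omega)
            (by rw [hlen']; omega)
            (by rw [hcs']; exact Or.inr (by rw [hbound]; exact fun hx => hq (Option.some.inj hx)))]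
          rw [hscan, if_neg heven, hdrop3]
          have htk : (cs.take fn ++ '\\' :: cs.drop fn).take (fn + 4) =
              cs.take fn ++ ['\\', q, q, q] := by
            rw [hcs', List.take_append, List.take_of_length_le (by rw [hlentake]; omega),
              hlentake, show fn + 4 - fn = 4 from by omega]
            rfl
          have hdk : (cs.take fn ++ '\\' :: cs.drop fn).drop (fn + 4) = cs.drop (fn + 3) := by
            rw [hcs', List.drop_append, List.drop_eq_nil_of_le (by rw [hlentake]; omega),
              hlentake, show fn + 4 - fn = 4 from by omega, List.nil_append]
            have hdt : cs.drop (fn + 3) = (cs.drop fn).drop 3 := by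
              rw [List.drop_drop]
            rw [hdt, ← ht]
            rfl
          rw [htk, hdk, ← htakef]
          simp [List.append_assoc]
    · rw [dif_neg hi]
      rw [List.drop_eq_nil_of_le (by omega), pv_scan_nil, List.take_of_length_le (by omega)]
      simp

theorem pv_main (q : Char) (hq : q ≠ '\\') (cs : List Char) :
    pvA_loop q cs 0 = pvB_loop q cs 0 := by
  have ha := pvA_eq_scan q hq cs.length cs 0 (by omega) (by omega) (Or.inl rfl)
  have hb := pvB_eq_scan q cs 0
  simp at ha hb
  rw [ha, hb]

theorem pv_range_map (g : List Char → List Char) (d : List Char) (xs : List (List Char))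
    (k : Nat) (hk : k ≤ xs.length) :
    (PySem.List.pyRange 1 (k : Int) 1).map (fun i => g (PySem.List.pyGetD xs i d)) =
      ((xs.drop 1).take (k - 1)).map g := by
  induction k with
  | zero =>
    have h0 : PySem.List.pyRange 1 ((0 : Nat) : Int) 1 = [] := by decide
    rw [h0]
    simp
  | succ k ih =>
    cases k with
    | zero =>
      have h1 : PySem.List.pyRange 1 ((1 : Nat) : Int) 1 = [] := by decide
      rw [h1]
      simp
    | succ m =>
      have hcast : ((m + 2 : Nat) : Int) = ((m + 1 : Nat) : Int) + 1 := by push_cast; ring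
      rw [hcast, PySem.List.pyRange_one_succ_right (by push_cast; omega)]
      rw [List.map_append, ih (by omega)]
      simp only [List.map_cons, List.map_nil]
      rw [PySem.List.pyGetD_natCast]
      have hlt : 1 + m < xs.length := by omega
      have ht1 : (xs.drop 1).take (m + 2 - 1) =
          (xs.drop 1).take m ++ ((xs.drop 1)[m]?).toList := by
        rw [show m + 2 - 1 = m + 1 from rfl]
        exact List.take_add_one
      rw [ht1, List.getElem?_drop, List.getElem?_eq_getElem hlt]
      rw [List.getD_eq_getElem xs d (show m + 1 < xs.length from by omega)]
      rw [List.map_append]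
      simp only [Nat.add_sub_cancel, Option.toList_some, List.map_cons, List.map_nil,
        show 1 + m = m + 1 from by omega]

theorem pv_range_map_A (q : Char) (xs : List (List Char)) (k : Nat) (hk : k ≤ xs.length) :
    (PySem.List.pyRange 1 (k : Int) 1).map (fun i => pvA_loop q (PySem.List.pyGetD xs i []) 0) =
      ((xs.drop 1).take (k - 1)).map (fun l => pvA_loop q l 0) :=
  pv_range_map (fun l => pvA_loop q l 0) [] xs k hk

theorem pv_mid (q : Char) (hq : q ≠ '\\') (lines : List (List Char)) (h2 : 2 ≤ lines.length)
    (fl ll : List (List Char)) :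
    fl ++ (PySem.List.pyRange 1 ((lines.length : Int) - 1) 1).map
        (fun i => pvA_loop q (PySem.List.pyGetD lines i []) 0) ++ ll =
      fl ++ (PySem.List.slice lines (some 1) (some ((lines.length : Int) - 1))).map
        (fun l => pvB_loop q l 0) ++ ll := by
  have hc : ((lines.length : Int) - 1) = ((lines.length - 1 : Nat) : Int) := by omega
  rw [hc, pv_range_map_A q lines (lines.length - 1) (by omega)]
  rw [PySem.List.slice_toNat lines (by norm_num) (by omega)]
  simp only [Int.toNat_natCast, Int.toNat_one]
  congr 2
  exact List.map_congr_left (fun l _ => pv_main q hq l)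

-- ===== VERDICT (by name: the statement is the Claim_ definition above) =====
set_option maxHeartbeats 1000000 in
theorem fix_triple_quote_contents_spec : Claim_equal_fix_triple_quote_contents := by
  intro text _
  unfold Spec_fix_triple_quote_contents fix_triple_quote_contents fix_triple_quote_contents_alt
  by_cases h0 : text = ""
  · simp [h0]
  · simp only [if_neg h0]
    by_cases hd1 : PySem.Chars.isIn ['"', '"', '"']
        (PySem.List.pyGetD (PySem.Chars.splitlines text.toList) 0 []) = true
    · rw [if_pos hd1]
      dsimp only
      by_cases hl : (PySem.Chars.splitlines text.toList).length ≤ 1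
      · rw [if_pos hl, if_pos hl]
      · rw [if_neg hl, if_neg hl]
        by_cases hin : PySem.Chars.isIn ['"', '"', '"']
            (PySem.List.pyGetD (PySem.Chars.splitlines text.toList) (-1) []) = true
        · rw [if_neg (not_not_intro hin), if_neg (not_not_intro hin)]
          rw [PySem.List.foldl_append_singleton_eq_map]
          exact congrArg _ (congrArg _ (pv_mid '"' (by decide) _ (by omega) _ _))
        · rw [if_pos hin, if_pos hin]
    · rw [if_neg hd1]
      by_cases hd2 : PySem.Chars.isIn ['\'', '\'', '\'']
          (PySem.List.pyGetD (PySem.Chars.splitlines text.toList) 0 []) = true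
      · rw [if_pos hd2]
        dsimp only
        by_cases hl : (PySem.Chars.splitlines text.toList).length ≤ 1
        · rw [if_pos hl, if_pos hl]
        · rw [if_neg hl, if_neg hl]
          by_cases hin : PySem.Chars.isIn ['\'', '\'', '\'']
              (PySem.List.pyGetD (PySem.Chars.splitlines text.toList) (-1) []) = true
          · rw [if_neg (not_not_intro hin), if_neg (not_not_intro hin)]
            rw [PySem.List.foldl_append_singleton_eq_map]
            exact congrArg _ (congrArg _ (pv_mid '\'' (by decide) _ (by omega) _ _))
          · rw [if_pos hin, if_pos hin]
      · rw [if_neg hd2]
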